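-- pv_equiv track=rewrite | github.com/benzyfan/MiniGo_Agent | aggressive_player.py | remove_dead_stones
-- ===== SOURCE A (Python) =====
-- BOARD_SIZE = 5
--
-- def has_liberty(board, x, y, visited=None):
--     if visited is None:
--         visited = set()
--     if (x, y) in visited:
--         return False
--     visited.add((x, y))
--     player = board[x][y]
--     for dx, dy in [(-1,0),(1,0),(0,-1),(0,1)]:
--         nx, ny = x + dx, y + dy
--         if 0 <= nx < BOARD_SIZE and 0 <= ny < BOARD_SIZE:
--             if board[nx][ny] == 0:
--                 return True
--             elif board[nx][ny] == player:
--                 if has_liberty(board, nx, ny, visited):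
--                     return True
--     return False
--
-- def remove_dead_stones(board, player):
--     removed = 0
--     for i in range(BOARD_SIZE):
--         for j in range(BOARD_SIZE):
--             if board[i][j] == player and not has_liberty(board, i, j):
--                 board[i][j] = 0
--                 removed += 1
--     return removed
-- ===== SOURCE B (Python) =====
-- BOARD_SIZE = 5
--
-- def has_liberty(board, x, y):
--     # Level-wise flood fill of the same-valued group, returning True as soon
--     # as any empty (0) neighbor of the group is seen.
--     p = board[x][y]
--     region = {(x, y)}
--     frontier = [(x, y)]
--     while frontier:
--         next_frontier = []
--         for cx, cy in frontier:
--             for nx, ny in ((cx - 1, cy), (cx + 1, cy), (cx, cy - 1), (cx, cy + 1)):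
--                 if 0 <= nx < BOARD_SIZE and 0 <= ny < BOARD_SIZE:
--                     v = board[nx][ny]
--                     if v == 0:
--                         return True
--                     if v == p and (nx, ny) not in region:
--                         region.add((nx, ny))
--                         next_frontier.append((nx, ny))
--         frontier = next_frontier
--     return False
--
-- def remove_dead_stones(board, player):
--     removed = 0
--     for i in range(BOARD_SIZE):
--         for j in range(BOARD_SIZE):
--             if board[i][j] == player and not has_liberty(board, i, j):
--                 board[i][j] = 0
--                 removed += 1
--     return removed
-- ===== Notes on version B (the rewrite author's own statement) =====
-- stated objective: alternative
-- what changed: has_liberty is rewritten from a recursive depth-first search threading a shared visited set through nested calls into an iterative level-wise (breadth-first) flood fill of the stone's group with an explicit frontier list, still returning True the moment an empty neighbor is seen; the outer removal loop and in-place board mutation are kept identical.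
import Mathlib
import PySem

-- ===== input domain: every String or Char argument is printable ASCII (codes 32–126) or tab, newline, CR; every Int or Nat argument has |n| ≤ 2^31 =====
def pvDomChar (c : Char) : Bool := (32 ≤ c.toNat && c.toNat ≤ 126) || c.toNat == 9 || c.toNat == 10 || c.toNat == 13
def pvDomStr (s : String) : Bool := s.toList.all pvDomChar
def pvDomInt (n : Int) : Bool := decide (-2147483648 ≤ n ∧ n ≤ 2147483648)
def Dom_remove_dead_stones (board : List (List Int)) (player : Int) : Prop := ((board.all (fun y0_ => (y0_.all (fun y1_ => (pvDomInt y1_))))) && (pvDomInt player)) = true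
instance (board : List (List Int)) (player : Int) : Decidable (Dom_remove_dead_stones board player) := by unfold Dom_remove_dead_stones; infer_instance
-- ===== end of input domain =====

-- B replaces the recursive depth-first liberty search of A by an iterative level-wise
-- (breadth-first) flood fill with an explicit frontier; the outer removal loop and its
-- in-place board mutation are unchanged (A mutates `board` in place; the theorems below
-- are about the RETURN value, and B performs the same mutation in Python).

-- shared cell access/update helpers (exact for the in-bounds indices both programs use;
-- Pre_ excludes boards smaller than 5×5, on which Python raises IndexError)
def pvAt (b : List (List Int)) (x y : Int) : Int :=
  PySem.List.pyGetD (PySem.List.pyGetD b x []) y 0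

def pvSet0 (b : List (List Int)) (x y : Int) : List (List Int) :=
  PySem.List.pySetD b x (PySem.List.pySetD (PySem.List.pyGetD b x []) y 0)

def pvDirs : List (Int × Int) := [(-1,0),(1,0),(0,-1),(0,1)]

-- ===== PORT A =====
-- has_liberty: recursive DFS sharing one mutated `visited` set (threaded explicitly);
-- `fuel` only guards the recursion (depth ≤ 26 on a 5×5 board, so fuel 26 is never exhausted).
mutual
def hasLibA (b : List (List Int)) (x y : Int) (visited : PySem.Set (Int × Int)) (fuel : Nat) :
    Bool × PySem.Set (Int × Int) :=
  match fuel with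
  | 0 => (false, visited)
  | fuel + 1 =>
    if (x, y) ∈ visited then (false, visited)
    else
      hasLibGoA b x y (pvAt b x y) pvDirs (PySem.Set.add visited (x, y)) fuel
termination_by (fuel, 0)

def hasLibGoA (b : List (List Int)) (x y player : Int) (ds : List (Int × Int))
    (visited : PySem.Set (Int × Int)) (fuel : Nat) : Bool × PySem.Set (Int × Int) :=
  match ds with
  | [] => (false, visited)
  | (dx, dy) :: rest =>
    let nx := x + dx
    let ny := y + dy
    if 0 ≤ nx ∧ nx < 5 ∧ 0 ≤ ny ∧ ny < 5 then
      if pvAt b nx ny = 0 then (true, visited)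
      else if pvAt b nx ny = player then
        match hasLibA b nx ny visited fuel with
        | (true, v') => (true, v')
        | (false, v') => hasLibGoA b x y player rest v' fuel
      else hasLibGoA b x y player rest visited fuel
    else hasLibGoA b x y player rest visited fuel
termination_by (fuel, ds.length + 1)
end

def rdsInnerA (b : List (List Int)) (player : Int) (i : Int) (js : List Int) (removed : Int) :
    List (List Int) × Int :=
  match js with
  | [] => (b, removed)
  | j :: rest =>
    if pvAt b i j = player ∧ (hasLibA b i j PySem.Set.empty 26).1 = false then
      rdsInnerA (pvSet0 b i j) player i rest (removed + 1)
    else rdsInnerA b player i rest removed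

def rdsOuterA (b : List (List Int)) (player : Int) (is : List Int) (removed : Int) :
    List (List Int) × Int :=
  match is with
  | [] => (b, removed)
  | i :: rest =>
    let st := rdsInnerA b player i (PySem.List.pyRange 0 5 1) removed
    rdsOuterA st.1 player rest st.2

def remove_dead_stones (board : List (List Int)) (player : Int) : Int :=
  (rdsOuterA board player (PySem.List.pyRange 0 5 1) 0).2

-- ===== PORT B =====
-- has_liberty: iterative breadth-first flood fill; `none` from the inner loops means an
-- empty neighbor was found (Python's early `return True`).
def hasLibCellB (b : List (List Int)) (p cx cy : Int) (ds : List (Int × Int))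
    (region : PySem.Set (Int × Int)) (nf : List (Int × Int)) :
    Option (PySem.Set (Int × Int) × List (Int × Int)) :=
  match ds with
  | [] => some (region, nf)
  | (dx, dy) :: rest =>
    let nx := cx + dx
    let ny := cy + dy
    if 0 ≤ nx ∧ nx < 5 ∧ 0 ≤ ny ∧ ny < 5 then
      if pvAt b nx ny = 0 then none
      else if pvAt b nx ny = p ∧ (nx, ny) ∉ region then
        hasLibCellB b p cx cy rest (PySem.Set.add region (nx, ny)) (nf ++ [(nx, ny)])
      else hasLibCellB b p cx cy rest region nf
    else hasLibCellB b p cx cy rest region nf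

def hasLibFrontB (b : List (List Int)) (p : Int) (cells : List (Int × Int))
    (region : PySem.Set (Int × Int)) (nf : List (Int × Int)) :
    Option (PySem.Set (Int × Int) × List (Int × Int)) :=
  match cells with
  | [] => some (region, nf)
  | (cx, cy) :: rest =>
    match hasLibCellB b p cx cy pvDirs region nf with
    | none => none
    | some (region', nf') => hasLibFrontB b p rest region' nf'

-- `fuel` only guards the while loop (≤ 26 rounds on a 5×5 board, so fuel 26 is never exhausted)
def hasLibB (b : List (List Int)) (p : Int) (region : PySem.Set (Int × Int))
    (frontier : List (Int × Int)) (fuel : Nat) : Bool :=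
  match fuel with
  | 0 => false
  | fuel + 1 =>
    match frontier with
    | [] => false
    | _ :: _ =>
      match hasLibFrontB b p frontier region [] with
      | none => true
      | some (region', nf) => hasLibB b p region' nf fuel

def hasLibBTop (b : List (List Int)) (x y : Int) : Bool :=
  hasLibB b (pvAt b x y) (PySem.Set.ofList [(x, y)]) [(x, y)] 26

def rdsInnerB (b : List (List Int)) (player : Int) (i : Int) (js : List Int) (removed : Int) :
    List (List Int) × Int :=
  match js with
  | [] => (b, removed)
  | j :: rest =>
    if pvAt b i j = player ∧ hasLibBTop b i j = false then
      rdsInnerB (pvSet0 b i j) player i rest (removed + 1)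
    else rdsInnerB b player i rest removed

def rdsOuterB (b : List (List Int)) (player : Int) (is : List Int) (removed : Int) :
    List (List Int) × Int :=
  match is with
  | [] => (b, removed)
  | i :: rest =>
    let st := rdsInnerB b player i (PySem.List.pyRange 0 5 1) removed
    rdsOuterB st.1 player rest st.2

def remove_dead_stones_alt (board : List (List Int)) (player : Int) : Int :=
  (rdsOuterB board player (PySem.List.pyRange 0 5 1) 0).2

-- ===== PRECONDITION & SPEC =====
-- Pre_ excludes exactly the boards on which the Python raises IndexError: fewer than 5 rows,
-- or one of the first 5 rows shorter than 5 cells (BOARD_SIZE = 5).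
def Pre_remove_dead_stones (board : List (List Int)) (player : Int) : Prop :=
  5 ≤ board.length ∧ ∀ r ∈ board.take 5, 5 ≤ r.length

instance (board : List (List Int)) (player : Int) : Decidable (Pre_remove_dead_stones board player) := by
  unfold Pre_remove_dead_stones; infer_instance

def pvWitness_remove_dead_stones : List (List Int) × Int :=
  ([[1, 2, 0, 0, 0], [2, 0, 0, 0, 0], [0, 0, 0, 0, 0], [0, 0, 0, 0, 0], [0, 0, 0, 0, 1]], 1)

def Spec_remove_dead_stones (board : List (List Int)) (player : Int) (out : Int) : Prop := out = remove_dead_stones_alt board player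
instance (board : List (List Int)) (player : Int) (out : Int) : Decidable (Spec_remove_dead_stones board player out) := by unfold Spec_remove_dead_stones; infer_instance

-- ===== CLAIM (what is proved, stated in full; the proofs are below) =====
def Claim_equal_remove_dead_stones : Prop := ∀ (board : List (List Int)) (player : Int), Dom_remove_dead_stones board player → Pre_remove_dead_stones board player → Spec_remove_dead_stones board player (remove_dead_stones board player)

-- ===== LEMMAS AND PROOFS =====
-- ----- proof-side notions: the liberty specification both searches compute -----

-- in-bounds cell of the 5×5 board
abbrev pvInb (c : Int × Int) : Prop := 0 ≤ c.1 ∧ c.1 < 5 ∧ 0 ≤ c.2 ∧ c.2 < 5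

-- one step inside the same-valued group: to an in-bounds neighbor holding value p
def pvStep (b : List (List Int)) (p : Int) (c d : Int × Int) : Prop :=
  (∃ e ∈ pvDirs, d = (c.1 + e.1, c.2 + e.2)) ∧ pvInb d ∧ pvAt b d.1 d.2 = p

def pvReach (b : List (List Int)) (p : Int) : Int × Int → Int × Int → Prop :=
  Relation.ReflTransGen (pvStep b p)

-- cell with an in-bounds empty neighbor
def pvOpen (b : List (List Int)) (c : Int × Int) : Bool :=
  pvDirs.any (fun e =>
    decide (0 ≤ c.1 + e.1 ∧ c.1 + e.1 < 5 ∧ 0 ≤ c.2 + e.2 ∧ c.2 + e.2 < 5) &&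
    decide (pvAt b (c.1 + e.1) (c.2 + e.2) = 0))

-- the group of c (w.r.t. value p) has a liberty
def pvGood (b : List (List Int)) (p : Int) (c : Int × Int) : Prop :=
  ∃ d, pvReach b p c d ∧ pvOpen b d = true

-- cell fully explored relative to the set w
def pvProc (b : List (List Int)) (p : Int) (w : List (Int × Int)) (c : Int × Int) : Prop :=
  pvOpen b c = false ∧ ∀ d, pvStep b p c d → d ∈ w

lemma pvProc_mono {b p w w' c} (hw : w ⊆ w') (h : pvProc b p w c) : pvProc b p w' c :=
  ⟨h.1, fun d hd => hw (h.2 d hd)⟩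

lemma pvReach_mem {b p} {S : List (Int × Int)}
    (hcl : ∀ e ∈ S, ∀ d, pvStep b p e d → d ∈ S) :
    ∀ {c d}, pvReach b p c d → c ∈ S → d ∈ S := by
  intro c d h
  induction h with
  | refl => exact fun hc => hc
  | tail _ h2 ih => exact fun hc => hcl _ (ih hc) _ h2

lemma pvNotGood {b p} {S : List (Int × Int)} {c : Int × Int} (hc : c ∈ S)
    (hcl : ∀ e ∈ S, ∀ d, pvStep b p e d → d ∈ S)
    (hno : ∀ e ∈ S, pvOpen b e = false) : ¬ pvGood b p c := by
  rintro ⟨d, hr, hg⟩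
  have : d ∈ S := pvReach_mem hcl hr hc
  rw [hno d this] at hg
  exact Bool.false_ne_true hg

lemma pvPrefix_add (s : PySem.Set (Int × Int)) (x : Int × Int) : s <+: PySem.Set.add s x := by
  rw [PySem.Set.add_eq_ite]
  split
  · exact List.prefix_refl _
  · exact ⟨[x], rfl⟩

def pvGrid : List (Int × Int) :=
  (List.range 5).flatMap (fun i => (List.range 5).map (fun j => ((i : Int), (j : Int))))

lemma pvLength_le_25 (v : List (Int × Int)) (hnd : v.Nodup) (hin : ∀ c ∈ v, pvInb c) :
    v.length ≤ 25 := by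
  have hs : v ⊆ pvGrid := by
    intro c hc
    obtain ⟨h1, h2, h3, h4⟩ := hin c hc
    obtain ⟨x, y⟩ := c
    simp only at h1 h2 h3 h4
    interval_cases x <;> interval_cases y <;> decide
  have h1 : v.toFinset.card = v.length := List.toFinset_card_of_nodup hnd
  have h2 : v.toFinset ⊆ pvGrid.toFinset := by
    intro a ha; simp only [List.mem_toFinset] at *; exact hs ha
  calc v.length = v.toFinset.card := h1.symm
    _ ≤ pvGrid.toFinset.card := Finset.card_le_card h2
    _ ≤ pvGrid.length := pvGrid.toFinset_card_le
    _ = 25 := by decide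

-- ----- A side: the recursive DFS decides pvGood -----

lemma pvMonoGo_of (fuel : Nat)
    (hA : ∀ (b : List (List Int)) (x y : Int) (v : PySem.Set (Int × Int)),
      v <+: (hasLibA b x y v fuel).2) :
    ∀ (b : List (List Int)) (x y p : Int) (ds : List (Int × Int)) (v : PySem.Set (Int × Int)),
      v <+: (hasLibGoA b x y p ds v fuel).2 := by
  intro b x y p ds
  induction ds with
  | nil => intro v; simp [hasLibGoA]
  | cons d rest ih =>
    intro v
    obtain ⟨dx, dy⟩ := d
    simp only [hasLibGoA]
    split
    · split
      · exact List.prefix_refl _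
      · split
        · rcases hr : hasLibA b (x + dx) (y + dy) v fuel with ⟨b1, v'⟩
          have hpre : v <+: v' := by have h := hA b (x + dx) (y + dy) v; rw [hr] at h; exact h
          cases b1
          · exact hpre.trans (ih v')
          · exact hpre
        · exact ih v
    · exact ih v

lemma pvMonoA : ∀ (fuel : Nat) (b : List (List Int)) (x y : Int) (v : PySem.Set (Int × Int)),
    v <+: (hasLibA b x y v fuel).2 := by
  intro fuel
  induction fuel with
  | zero => intro b x y v; simp [hasLibA]
  | succ f ih =>
    intro b x y v
    simp only [hasLibA]
    split
    · exact List.prefix_refl _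
    · exact (pvPrefix_add v (x, y)).trans (pvMonoGo_of f ih b x y _ pvDirs _)

lemma pvMonoGoA : ∀ (fuel : Nat) (b : List (List Int)) (x y p : Int) (ds : List (Int × Int))
    (v : PySem.Set (Int × Int)), v <+: (hasLibGoA b x y p ds v fuel).2 :=
  fun fuel => pvMonoGo_of fuel (pvMonoA fuel)

lemma pvSoundGo_of (fuel : Nat)
    (hA : ∀ (b : List (List Int)) (x y : Int) (v : PySem.Set (Int × Int)),
      (hasLibA b x y v fuel).1 = true → pvGood b (pvAt b x y) (x, y)) :
    ∀ (b : List (List Int)) (x y p : Int) (ds : List (Int × Int)) (v : PySem.Set (Int × Int)),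
      ds ⊆ pvDirs → pvAt b x y = p →
      (hasLibGoA b x y p ds v fuel).1 = true → pvGood b p (x, y) := by
  intro b x y p ds
  induction ds with
  | nil => intro v _ _ h; simp [hasLibGoA] at h
  | cons d rest ih =>
    intro v hds hp h
    obtain ⟨dx, dy⟩ := d
    have hds' : rest ⊆ pvDirs := fun e he => hds (List.mem_cons_of_mem _ he)
    simp only [hasLibGoA] at h
    split at h
    · rename_i hbnd
      split at h
      · rename_i hz
        exact ⟨(x, y), Relation.ReflTransGen.refl,
          List.any_eq_true.2 ⟨(dx, dy), hds List.mem_cons_self, by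
            simp only [Bool.and_eq_true, decide_eq_true_eq]
            exact ⟨hbnd, hz⟩⟩⟩
      · split at h
        · rename_i hpl
          rcases hr : hasLibA b (x + dx) (y + dy) v fuel with ⟨b1, v'⟩
          rw [hr] at h
          cases b1
          · exact ih v' hds' hp h
          · have hg := hA b (x + dx) (y + dy) v (by rw [hr])
            rw [hpl] at hg
            obtain ⟨e, hre, hoe⟩ := hg
            exact ⟨e, Relation.ReflTransGen.head
              ⟨⟨(dx, dy), hds List.mem_cons_self, rfl⟩, hbnd, hpl⟩ hre, hoe⟩
        · exact ih v hds' hp h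
    · exact ih v hds' hp h

lemma pvSoundA : ∀ (fuel : Nat) (b : List (List Int)) (x y : Int) (v : PySem.Set (Int × Int)),
    (hasLibA b x y v fuel).1 = true → pvGood b (pvAt b x y) (x, y) := by
  intro fuel
  induction fuel with
  | zero => intro b x y v h; simp [hasLibA] at h
  | succ f ih =>
    intro b x y v h
    simp only [hasLibA] at h
    split at h
    · simp at h
    · exact pvSoundGo_of f ih b x y (pvAt b x y) pvDirs _ (fun e he => he) rfl h

lemma pvOpen_eq_false_of (b : List (List Int)) (c : Int × Int)
    (h : ∀ e ∈ pvDirs, ¬(pvInb (c.1 + e.1, c.2 + e.2) ∧ pvAt b (c.1 + e.1) (c.2 + e.2) = 0)) :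
    pvOpen b c = false := by
  rw [pvOpen, List.any_eq_false]
  intro e he
  simp only [Bool.and_eq_true, decide_eq_true_eq]
  rintro ⟨h1, h2⟩
  exact h e he ⟨h1, h2⟩

lemma pvCompGo_of (fuel : Nat)
    (hA : ∀ (b : List (List Int)) (x y p : Int) (v : PySem.Set (Int × Int)),
      pvAt b x y = p → pvInb (x, y) → v.Nodup → (∀ c ∈ v, pvInb c) → 26 ≤ fuel + v.length →
      (hasLibA b x y v fuel).1 = false →
      (x, y) ∈ (hasLibA b x y v fuel).2 ∧ (hasLibA b x y v fuel).2.Nodup ∧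
        (∀ c ∈ (hasLibA b x y v fuel).2, pvInb c) ∧
        (∀ c ∈ (hasLibA b x y v fuel).2, c ∉ v → pvProc b p (hasLibA b x y v fuel).2 c)) :
    ∀ (b : List (List Int)) (x y p : Int) (ds : List (Int × Int)) (v : PySem.Set (Int × Int)),
      ds ⊆ pvDirs → v.Nodup → (∀ c ∈ v, pvInb c) → 26 ≤ fuel + v.length →
      (hasLibGoA b x y p ds v fuel).1 = false →
      (hasLibGoA b x y p ds v fuel).2.Nodup ∧
        (∀ c ∈ (hasLibGoA b x y p ds v fuel).2, pvInb c) ∧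
        (∀ c ∈ (hasLibGoA b x y p ds v fuel).2, c ∉ v →
          pvProc b p (hasLibGoA b x y p ds v fuel).2 c) ∧
        (∀ e ∈ ds, ¬(pvInb (x + e.1, y + e.2) ∧ pvAt b (x + e.1) (y + e.2) = 0)) ∧
        (∀ e ∈ ds, pvInb (x + e.1, y + e.2) → pvAt b (x + e.1) (y + e.2) = p →
          (x + e.1, y + e.2) ∈ (hasLibGoA b x y p ds v fuel).2) := by
  intro b x y p ds
  induction ds with
  | nil =>
    intro v _ hnd hin _ _
    simp only [hasLibGoA]
    exact ⟨hnd, hin, fun c hc hcv => absurd hc hcv, fun e he => absurd he (List.not_mem_nil),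
      fun e he => absurd he (List.not_mem_nil)⟩
  | cons d rest ih =>
    intro v hds hnd hin hfuel h
    obtain ⟨dx, dy⟩ := d
    have hds' : rest ⊆ pvDirs := fun e he => hds (List.mem_cons_of_mem _ he)
    simp only [hasLibGoA] at h ⊢
    by_cases hbnd : 0 ≤ x + dx ∧ x + dx < 5 ∧ 0 ≤ y + dy ∧ y + dy < 5
    · simp only [if_pos hbnd] at h ⊢
      by_cases hz : pvAt b (x + dx) (y + dy) = 0
      · simp only [if_pos hz] at h
        exact absurd h (by decide)
      · simp only [if_neg hz] at h ⊢
        by_cases hpl : pvAt b (x + dx) (y + dy) = p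
        · simp only [if_pos hpl] at h ⊢
          rcases hr : hasLibA b (x + dx) (y + dy) v fuel with ⟨b1, v'⟩
          rw [hr] at h
          cases b1
          · have hAres := hA b (x + dx) (y + dy) p v hpl hbnd hnd hin hfuel (by rw [hr])
            rw [hr] at hAres
            obtain ⟨hmem', hnd', hin', hproc'⟩ := hAres
            have hlen : v.length ≤ v'.length := by
              have hp := pvMonoA fuel b (x + dx) (y + dy) v
              rw [hr] at hp
              exact hp.length_le
            have ihres := ih v' hds' hnd' hin' (by omega) h
            have hsub : v' ⊆ (hasLibGoA b x y p rest v' fuel).2 :=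
              (pvMonoGoA fuel b x y p rest v').subset
            refine ⟨ihres.1, ihres.2.1, ?_, ?_, ?_⟩
            · intro c hc hcv
              by_cases hcv' : c ∈ v'
              · exact pvProc_mono hsub (hproc' c hcv' hcv)
              · exact ihres.2.2.1 c hc hcv'
            · intro e he
              rcases List.mem_cons.1 he with rfl | he'
              · rintro ⟨_, h0⟩; exact hz h0
              · exact ihres.2.2.2.1 e he'
            · intro e he
              rcases List.mem_cons.1 he with rfl | he'
              · intro _ _; exact hsub hmem'
              · exact ihres.2.2.2.2 e he'
          · simp at h
        · simp only [if_neg hpl] at h ⊢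
          have ihres := ih v hds' hnd hin hfuel h
          refine ⟨ihres.1, ihres.2.1, ihres.2.2.1, ?_, ?_⟩
          · intro e he
            rcases List.mem_cons.1 he with rfl | he'
            · rintro ⟨_, h0⟩; exact hz h0
            · exact ihres.2.2.2.1 e he'
          · intro e he
            rcases List.mem_cons.1 he with rfl | he'
            · intro _ hpe; exact absurd hpe hpl
            · exact ihres.2.2.2.2 e he'
    · simp only [if_neg hbnd] at h ⊢
      have ihres := ih v hds' hnd hin hfuel h
      refine ⟨ihres.1, ihres.2.1, ihres.2.2.1, ?_, ?_⟩
      · intro e he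
        rcases List.mem_cons.1 he with rfl | he'
        · rintro ⟨hinb, _⟩; exact hbnd hinb
        · exact ihres.2.2.2.1 e he'
      · intro e he
        rcases List.mem_cons.1 he with rfl | he'
        · intro hinb _; exact absurd hinb hbnd
        · exact ihres.2.2.2.2 e he'

lemma pvCompA : ∀ (fuel : Nat) (b : List (List Int)) (x y p : Int) (v : PySem.Set (Int × Int)),
    pvAt b x y = p → pvInb (x, y) → v.Nodup → (∀ c ∈ v, pvInb c) → 26 ≤ fuel + v.length →
    (hasLibA b x y v fuel).1 = false →
    (x, y) ∈ (hasLibA b x y v fuel).2 ∧ (hasLibA b x y v fuel).2.Nodup ∧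
      (∀ c ∈ (hasLibA b x y v fuel).2, pvInb c) ∧
      (∀ c ∈ (hasLibA b x y v fuel).2, c ∉ v → pvProc b p (hasLibA b x y v fuel).2 c) := by
  intro fuel
  induction fuel with
  | zero =>
    intro b x y p v _ _ hnd hin hfuel _
    have := pvLength_le_25 v hnd hin
    omega
  | succ f ih =>
    intro b x y p v hp hinb hnd hin hfuel h
    subst hp
    simp only [hasLibA] at h ⊢
    by_cases hmem : (x, y) ∈ v
    · simp only [if_pos hmem] at h ⊢
      exact ⟨hmem, hnd, hin, fun c hc hcv => absurd hc hcv⟩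
    · simp only [if_neg hmem] at h ⊢
      have hnd1 : (PySem.Set.add v (x, y)).Nodup := PySem.Set.nodup_add v (x, y) hnd
      have hin1 : ∀ c ∈ PySem.Set.add v (x, y), pvInb c := by
        intro c hc
        rcases (PySem.Set.mem_add _ _ _).1 hc with hc' | rfl
        · exact hin c hc'
        · exact hinb
      have hlen1 : (PySem.Set.add v (x, y)).length = v.length + 1 := by
        rw [PySem.Set.add_of_not_mem hmem, List.length_append, List.length_cons,
          List.length_nil]
      have hgo := pvCompGo_of f ih b x y (pvAt b x y) pvDirs (PySem.Set.add v (x, y))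
        (fun e he => he) hnd1 hin1 (by omega) h
      have hsub : PySem.Set.add v (x, y) ⊆
          (hasLibGoA b x y (pvAt b x y) pvDirs (PySem.Set.add v (x, y)) f).2 :=
        (pvMonoGoA f b x y (pvAt b x y) pvDirs _).subset
      refine ⟨hsub ((PySem.Set.mem_add _ _ _).2 (Or.inr rfl)), hgo.1, hgo.2.1, ?_⟩
      intro c hc hcv
      by_cases hcxy : c = (x, y)
      · subst hcxy
        constructor
        · exact pvOpen_eq_false_of b (x, y) (hgo.2.2.2.1)
        · rintro d ⟨⟨e, he, rfl⟩, hdin, hdp⟩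
          exact hgo.2.2.2.2 e he hdin hdp
      · have hcv1 : c ∉ PySem.Set.add v (x, y) := by
          rw [PySem.Set.mem_add]
          rintro (hc' | rfl)
          · exact hcv hc'
          · exact hcxy rfl
        exact hgo.2.2.1 c hc hcv1

lemma pvA_iff (b : List (List Int)) (x y : Int) (h : pvInb (x, y)) :
    (hasLibA b x y PySem.Set.empty 26).1 = true ↔ pvGood b (pvAt b x y) (x, y) := by
  constructor
  · exact pvSoundA 26 b x y _
  · intro hg
    by_contra hres
    have hf : (hasLibA b x y PySem.Set.empty 26).1 = false := by
      cases hv : (hasLibA b x y PySem.Set.empty 26).1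
      · rfl
      · exact absurd hv hres
    have hc := pvCompA 26 b x y (pvAt b x y) PySem.Set.empty rfl h List.nodup_nil
      (by intro c hc; exact absurd hc List.not_mem_nil) (by simp [PySem.Set.empty]) hf
    exact pvNotGood hc.1
      (fun e he d hd => (hc.2.2.2 e he List.not_mem_nil).2 d hd)
      (fun e he => (hc.2.2.2 e he List.not_mem_nil).1) hg


-- ----- B side: the breadth-first flood fill decides pvGood -----

lemma pvCellB_none : ∀ (b : List (List Int)) (p cx cy : Int) (ds : List (Int × Int))
    (region : PySem.Set (Int × Int)) (nf : List (Int × Int)),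
    ds ⊆ pvDirs → hasLibCellB b p cx cy ds region nf = none → pvOpen b (cx, cy) = true := by
  intro b p cx cy ds
  induction ds with
  | nil => intro region nf _ h; simp [hasLibCellB] at h
  | cons d rest ih =>
    intro region nf hds h
    obtain ⟨dx, dy⟩ := d
    have hds2 : rest ⊆ pvDirs := fun e he => hds (List.mem_cons_of_mem _ he)
    simp only [hasLibCellB] at h
    by_cases hbnd : 0 ≤ cx + dx ∧ cx + dx < 5 ∧ 0 ≤ cy + dy ∧ cy + dy < 5
    · simp only [if_pos hbnd] at h
      by_cases hz : pvAt b (cx + dx) (cy + dy) = 0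
      · exact List.any_eq_true.2 ⟨(dx, dy), hds List.mem_cons_self, by
          simp only [Bool.and_eq_true, decide_eq_true_eq]
          exact ⟨hbnd, hz⟩⟩
      · simp only [if_neg hz] at h
        by_cases hc : pvAt b (cx + dx) (cy + dy) = p ∧ (cx + dx, cy + dy) ∉ region
        · simp only [if_pos hc] at h
          exact ih _ _ hds2 h
        · simp only [if_neg hc] at h
          exact ih _ _ hds2 h
    · simp only [if_neg hbnd] at h
      exact ih _ _ hds2 h


lemma pvCellB_some : ∀ (b : List (List Int)) (p cx cy : Int) (ds : List (Int × Int))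
    (region : PySem.Set (Int × Int)) (nf : List (Int × Int)) (region' : PySem.Set (Int × Int))
    (nf' : List (Int × Int)), ds ⊆ pvDirs →
    hasLibCellB b p cx cy ds region nf = some (region', nf') →
    region <+: region' ∧ nf <+: nf' ∧
      region'.length + nf.length = region.length + nf'.length ∧
      (region.Nodup → region'.Nodup) ∧
      (∀ e ∈ region', e ∈ region ∨ (e ∈ nf' ∧ pvStep b p (cx, cy) e)) ∧
      (∀ e ∈ nf', e ∈ nf ∨ e ∈ region') ∧
      (∀ e ∈ ds, ¬(pvInb (cx + e.1, cy + e.2) ∧ pvAt b (cx + e.1) (cy + e.2) = 0)) ∧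
      (∀ e ∈ ds, pvInb (cx + e.1, cy + e.2) → pvAt b (cx + e.1) (cy + e.2) = p →
        (cx + e.1, cy + e.2) ∈ region') := by
  intro b p cx cy ds
  induction ds with
  | nil =>
    intro region nf region' nf' _ h
    simp only [hasLibCellB, Option.some.injEq, Prod.mk.injEq] at h
    obtain ⟨rfl, rfl⟩ := h
    exact ⟨List.prefix_refl _, List.prefix_refl _, rfl, fun h => h,
      fun e he => Or.inl he, fun e he => Or.inl he,
      fun e he => absurd he List.not_mem_nil, fun e he => absurd he List.not_mem_nil⟩
  | cons d rest ih =>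
    intro region nf region' nf' hds h
    obtain ⟨dx, dy⟩ := d
    have hds2 : rest ⊆ pvDirs := fun e he => hds (List.mem_cons_of_mem _ he)
    simp only [hasLibCellB] at h
    by_cases hbnd : 0 ≤ cx + dx ∧ cx + dx < 5 ∧ 0 ≤ cy + dy ∧ cy + dy < 5
    · simp only [if_pos hbnd] at h
      by_cases hz : pvAt b (cx + dx) (cy + dy) = 0
      · simp only [if_pos hz] at h
        exact absurd h (by simp)
      · simp only [if_neg hz] at h
        by_cases hc : pvAt b (cx + dx) (cy + dy) = p ∧ (cx + dx, cy + dy) ∉ region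
        · simp only [if_pos hc] at h
          have hadd : PySem.Set.add region (cx + dx, cy + dy) =
              region ++ [(cx + dx, cy + dy)] := PySem.Set.add_of_not_mem hc.2
          obtain ⟨i1, i2, i3, i4, i5, i6, i7, i8⟩ := ih _ _ _ _ hds2 h
          have hmemr2 : (cx + dx, cy + dy) ∈ PySem.Set.add region (cx + dx, cy + dy) :=
            (PySem.Set.mem_add _ _ _).2 (Or.inr rfl)
          have hstep : pvStep b p (cx, cy) (cx + dx, cy + dy) :=
            ⟨⟨(dx, dy), hds List.mem_cons_self, rfl⟩, hbnd, hc.1⟩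
          refine ⟨?_, ?_, ?_, ?_, ?_, ?_, ?_, ?_⟩
          · exact (hadd ▸ List.prefix_append _ _).trans i1
          · exact (List.prefix_append _ _).trans i2
          · have e1 : (PySem.Set.add region (cx + dx, cy + dy)).length =
                region.length + 1 := by rw [hadd]; simp
            have e2 : (nf ++ [(cx + dx, cy + dy)]).length = nf.length + 1 := by simp
            omega
          · intro hnd
            exact i4 (PySem.Set.nodup_add region (cx + dx, cy + dy) hnd)
          · intro e he
            rcases i5 e he with hr2 | hnf
            · rcases (PySem.Set.mem_add _ _ _).1 hr2 with hreg | heq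
              · exact Or.inl hreg
              · subst heq
                exact Or.inr ⟨i2.subset (List.mem_append_right _ List.mem_cons_self), hstep⟩
            · exact Or.inr hnf
          · intro e he
            rcases i6 e he with hnf2 | hr
            · rcases List.mem_append.1 hnf2 with hnf | hsing
              · exact Or.inl hnf
              · rcases List.mem_singleton.1 hsing with rfl
                exact Or.inr (i1.subset hmemr2)
            · exact Or.inr hr
          · intro e he
            rcases List.mem_cons.1 he with heq | he2
            · subst heq; rintro ⟨_, h0⟩; exact hz h0
            · exact i7 e he2
          · intro e he
            rcases List.mem_cons.1 he with heq | he2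
            · subst heq; intro _ _; exact i1.subset hmemr2
            · exact i8 e he2
        · simp only [if_neg hc] at h
          obtain ⟨i1, i2, i3, i4, i5, i6, i7, i8⟩ := ih _ _ _ _ hds2 h
          refine ⟨i1, i2, i3, i4, i5, i6, ?_, ?_⟩
          · intro e he
            rcases List.mem_cons.1 he with heq | he2
            · subst heq; rintro ⟨_, h0⟩; exact hz h0
            · exact i7 e he2
          · intro e he
            rcases List.mem_cons.1 he with heq | he2
            · subst heq
              intro _ hpe
              have hreg : (cx + dx, cy + dy) ∈ region := by
                by_contra hnr
                exact hc ⟨hpe, hnr⟩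
              exact i1.subset hreg
            · exact i8 e he2
    · simp only [if_neg hbnd] at h
      obtain ⟨i1, i2, i3, i4, i5, i6, i7, i8⟩ := ih _ _ _ _ hds2 h
      refine ⟨i1, i2, i3, i4, i5, i6, ?_, ?_⟩
      · intro e he
        rcases List.mem_cons.1 he with heq | he2
        · subst heq; rintro ⟨hinb, _⟩; exact hbnd hinb
        · exact i7 e he2
      · intro e he
        rcases List.mem_cons.1 he with heq | he2
        · subst heq; intro hinb _; exact absurd hinb hbnd
        · exact i8 e he2


lemma pvFrontB_none : ∀ (b : List (List Int)) (p : Int) (cells : List (Int × Int))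
    (region : PySem.Set (Int × Int)) (nf : List (Int × Int)),
    hasLibFrontB b p cells region nf = none → ∃ c ∈ cells, pvOpen b c = true := by
  intro b p cells
  induction cells with
  | nil => intro region nf h; simp [hasLibFrontB] at h
  | cons c rest ih =>
    intro region nf h
    obtain ⟨cx, cy⟩ := c
    simp only [hasLibFrontB] at h
    rcases hcell : hasLibCellB b p cx cy pvDirs region nf with _ | ⟨r2, n2⟩
    · exact ⟨(cx, cy), List.mem_cons_self,
        pvCellB_none b p cx cy pvDirs region nf (fun e he => he) hcell⟩
    · rw [hcell] at h
      obtain ⟨c', hc', ho⟩ := ih r2 n2 h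
      exact ⟨c', List.mem_cons_of_mem _ hc', ho⟩

lemma pvFrontB_some : ∀ (b : List (List Int)) (p : Int) (cells : List (Int × Int))
    (region : PySem.Set (Int × Int)) (nf : List (Int × Int)) (region' : PySem.Set (Int × Int))
    (nf' : List (Int × Int)),
    hasLibFrontB b p cells region nf = some (region', nf') →
    region <+: region' ∧ nf <+: nf' ∧
      region'.length + nf.length = region.length + nf'.length ∧
      (region.Nodup → region'.Nodup) ∧
      (∀ e ∈ region', e ∈ region ∨ (e ∈ nf' ∧ ∃ c ∈ cells, pvStep b p c e)) ∧
      (∀ e ∈ nf', e ∈ nf ∨ e ∈ region') ∧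
      (∀ c ∈ cells, pvOpen b c = false ∧ ∀ d, pvStep b p c d → d ∈ region') := by
  intro b p cells
  induction cells with
  | nil =>
    intro region nf region' nf' h
    simp only [hasLibFrontB, Option.some.injEq, Prod.mk.injEq] at h
    obtain ⟨rfl, rfl⟩ := h
    exact ⟨List.prefix_refl _, List.prefix_refl _, rfl, fun h => h,
      fun e he => Or.inl he, fun e he => Or.inl he,
      fun c hc => absurd hc List.not_mem_nil⟩
  | cons c rest ih =>
    intro region nf region' nf' h
    obtain ⟨cx, cy⟩ := c
    simp only [hasLibFrontB] at h
    rcases hcell : hasLibCellB b p cx cy pvDirs region nf with _ | ⟨r2, n2⟩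
    · rw [hcell] at h; exact absurd h (by simp)
    · rw [hcell] at h
      obtain ⟨c1, c2, c3, c4, c5, c6, c7, c8⟩ :=
        pvCellB_some b p cx cy pvDirs region nf r2 n2 (fun e he => he) hcell
      obtain ⟨i1, i2, i3, i4, i5, i6, i7⟩ := ih r2 n2 region' nf' h
      refine ⟨c1.trans i1, c2.trans i2, by omega, fun hnd => i4 (c4 hnd), ?_, ?_, ?_⟩
      · intro e he
        rcases i5 e he with hr2 | ⟨hnf, c', hc', hst⟩
        · rcases c5 e hr2 with hreg | ⟨hn2, hst⟩
          · exact Or.inl hreg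
          · exact Or.inr ⟨i2.subset hn2, (cx, cy), List.mem_cons_self, hst⟩
        · exact Or.inr ⟨hnf, c', List.mem_cons_of_mem _ hc', hst⟩
      · intro e he
        rcases i6 e he with hn2 | hr
        · rcases c6 e hn2 with hnf | hr2
          · exact Or.inl hnf
          · exact Or.inr (i1.subset hr2)
        · exact Or.inr hr
      · intro c hc
        rcases List.mem_cons.1 hc with heq | hc2
        · subst heq
          constructor
          · exact pvOpen_eq_false_of b (cx, cy) c7
          · rintro d ⟨⟨e, he, rfl⟩, hdin, hdp⟩
            exact i1.subset (c8 e he hdin hdp)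
        · exact i7 c hc2

lemma pvSoundB : ∀ (fuel : Nat) (b : List (List Int)) (p : Int)
    (region : PySem.Set (Int × Int)) (frontier : List (Int × Int)),
    hasLibB b p region frontier fuel = true →
    ∃ c, (c ∈ region ∨ c ∈ frontier) ∧ pvGood b p c := by
  intro fuel
  induction fuel with
  | zero => intro b p region frontier h; simp [hasLibB] at h
  | succ f ih =>
    intro b p region frontier h
    match frontier with
    | [] => simp [hasLibB] at h
    | hd :: tl =>
      simp only [hasLibB] at h
      rcases hfr : hasLibFrontB b p (hd :: tl) region [] with _ | ⟨r2, nf⟩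
      · obtain ⟨c, hc, ho⟩ := pvFrontB_none b p (hd :: tl) region [] hfr
        exact ⟨c, Or.inr hc, c, Relation.ReflTransGen.refl, ho⟩
      · rw [hfr] at h
        obtain ⟨f1, f2, f3, f4, f5, f6, f7⟩ := pvFrontB_some b p (hd :: tl) region [] r2 nf hfr
        obtain ⟨c, hc, hg⟩ := ih b p r2 nf h
        have hcr2 : c ∈ r2 := by
          rcases hc with hc | hcnf
          · exact hc
          · rcases f6 c hcnf with hnil | hr
            · exact absurd hnil List.not_mem_nil
            · exact hr
        rcases f5 c hcr2 with hreg | ⟨_, c', hc', hst⟩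
        · exact ⟨c, Or.inl hreg, hg⟩
        · obtain ⟨d, hrd, hod⟩ := hg
          exact ⟨c', Or.inr hc', d, Relation.ReflTransGen.head hst hrd, hod⟩

lemma pvCompB : ∀ (fuel : Nat) (b : List (List Int)) (p : Int)
    (region : PySem.Set (Int × Int)) (frontier : List (Int × Int)),
    (∀ c ∈ frontier, c ∈ region) → region.Nodup → (∀ c ∈ region, pvInb c) →
    26 ≤ fuel + region.length →
    (∀ c ∈ region, c ∉ frontier → pvOpen b c = false ∧ ∀ d, pvStep b p c d → d ∈ region) →
    hasLibB b p region frontier fuel = false →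
    ∀ c ∈ region, ¬ pvGood b p c := by
  intro fuel
  induction fuel with
  | zero =>
    intro b p region frontier _ hnd hin hfuel _ _
    have := pvLength_le_25 region hnd hin
    omega
  | succ f ih =>
    intro b p region frontier hfr hnd hin hfuel hproc h
    match frontier with
    | [] =>
      intro c hc
      exact pvNotGood hc (fun e he d hd => (hproc e he List.not_mem_nil).2 d hd)
        (fun e he => (hproc e he List.not_mem_nil).1)
    | hd :: tl =>
      simp only [hasLibB] at h
      rcases hfrb : hasLibFrontB b p (hd :: tl) region [] with _ | ⟨r2, nf⟩
      · rw [hfrb] at h; exact absurd h (by simp)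
      · rw [hfrb] at h
        obtain ⟨f1, f2, f3, f4, f5, f6, f7⟩ :=
          pvFrontB_some b p (hd :: tl) region [] r2 nf hfrb
        have hfr2 : ∀ c ∈ nf, c ∈ r2 := by
          intro c hc
          rcases f6 c hc with hnil | hr
          · exact absurd hnil List.not_mem_nil
          · exact hr
        have hnd2 : r2.Nodup := f4 hnd
        have hin2 : ∀ c ∈ r2, pvInb c := by
          intro c hc
          rcases f5 c hc with hreg | ⟨_, _, _, hst⟩
          · exact hin c hreg
          · exact hst.2.1
        have hproc2 : ∀ c ∈ r2, c ∉ nf →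
            pvOpen b c = false ∧ ∀ d, pvStep b p c d → d ∈ r2 := by
          intro c hc hcnf
          by_cases hcf : c ∈ hd :: tl
          · exact f7 c hcf
          · by_cases hcreg : c ∈ region
            · obtain ⟨ho, hcl⟩ := hproc c hcreg hcf
              exact ⟨ho, fun d hd => f1.subset (hcl d hd)⟩
            · rcases f5 c hc with hreg | ⟨hnf, _⟩
              · exact absurd hreg hcreg
              · exact absurd hnf hcnf
        match nf with
        | [] =>
          intro c hc
          have hcr2 := f1.subset hc
          exact pvNotGood hcr2
            (fun e he d hd => (hproc2 e he List.not_mem_nil).2 d hd)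
            (fun e he => (hproc2 e he List.not_mem_nil).1)
        | n1 :: ns =>
          have hres := ih b p r2 (n1 :: ns) hfr2 hnd2 hin2
            (by
              have h3 := f3
              simp only [List.length_nil, List.length_cons, Nat.add_zero] at h3
              omega) hproc2 h
          intro c hc
          exact hres c (f1.subset hc)

lemma pvB_iff (b : List (List Int)) (x y : Int) (h : pvInb (x, y)) :
    hasLibBTop b x y = true ↔ pvGood b (pvAt b x y) (x, y) := by
  have hof : PySem.Set.ofList [(x, y)] = [(x, y)] :=
    PySem.Set.ofList_eq_self_of_nodup _ (List.nodup_singleton _)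
  constructor
  · intro ht
    rw [hasLibBTop, hof] at ht
    obtain ⟨c, hc, hg⟩ := pvSoundB 26 b (pvAt b x y) [(x, y)] [(x, y)] ht
    have hcxy : c = (x, y) := by
      rcases hc with hc | hc <;> exact List.mem_singleton.1 hc
    rwa [hcxy] at hg
  · intro hg
    by_contra hres
    have hf : hasLibBTop b x y = false := by
      cases hv : hasLibBTop b x y
      · rfl
      · exact absurd hv hres
    rw [hasLibBTop, hof] at hf
    have := pvCompB 26 b (pvAt b x y) [(x, y)] [(x, y)] (fun c hc => hc)
      (List.nodup_singleton _) (by intro c hc; rw [List.mem_singleton.1 hc]; exact h)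
      (by simp) (fun c hc hcn => absurd hc hcn) hf (x, y) (List.mem_singleton_self _)
    exact this hg

-- ----- the two liberty tests agree, hence the two removal loops agree -----

lemma pvLib_eq (b : List (List Int)) (x y : Int) (h : pvInb (x, y)) :
    (hasLibA b x y PySem.Set.empty 26).1 = hasLibBTop b x y := by
  rw [Bool.eq_iff_iff, pvA_iff b x y h, pvB_iff b x y h]

lemma pvInner_eq : ∀ (js : List Int) (b : List (List Int)) (player i removed : Int),
    0 ≤ i → i < 5 → (∀ j ∈ js, 0 ≤ j ∧ j < 5) →
    rdsInnerA b player i js removed = rdsInnerB b player i js removed := by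
  intro js
  induction js with
  | nil => intro b player i removed _ _ _; simp [rdsInnerA, rdsInnerB]
  | cons j rest ih =>
    intro b player i removed hi0 hi5 hjs
    have hj := hjs j (List.mem_cons_self)
    have hlib : (hasLibA b i j PySem.Set.empty 26).1 = hasLibBTop b i j :=
      pvLib_eq b i j ⟨hi0, hi5, hj.1, hj.2⟩
    simp only [rdsInnerA, rdsInnerB, hlib]
    split
    · exact ih _ _ _ _ hi0 hi5 (fun j' hj' => hjs j' (List.mem_cons_of_mem _ hj'))
    · exact ih _ _ _ _ hi0 hi5 (fun j' hj' => hjs j' (List.mem_cons_of_mem _ hj'))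

lemma pvOuter_eq : ∀ (is : List Int) (b : List (List Int)) (player removed : Int),
    (∀ i ∈ is, 0 ≤ i ∧ i < 5) →
    rdsOuterA b player is removed = rdsOuterB b player is removed := by
  intro is
  induction is with
  | nil => intro b player removed _; simp [rdsOuterA, rdsOuterB]
  | cons i rest ih =>
    intro b player removed his
    have hi := his i (List.mem_cons_self)
    have hrange : ∀ j ∈ PySem.List.pyRange 0 5 1, 0 ≤ j ∧ j < 5 := by decide
    simp only [rdsOuterA, rdsOuterB,
      pvInner_eq (PySem.List.pyRange 0 5 1) b player i removed hi.1 hi.2 hrange]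
    exact ih _ _ _ (fun i' hi' => his i' (List.mem_cons_of_mem _ hi'))

-- ===== VERDICT (by name: the statement is the Claim_ definition above) =====
theorem remove_dead_stones_spec : Claim_equal_remove_dead_stones := by
  intro board player _ _
  unfold Spec_remove_dead_stones remove_dead_stones remove_dead_stones_alt
  rw [pvOuter_eq]
  intro i hi
  have : PySem.List.pyRange 0 5 1 = [0, 1, 2, 3, 4] := by decide
  rw [this] at hi
  fin_cases hi <;> constructor <;> decide
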